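-- pv_equiv track=rewrite | github.com/shinkeonkim/boj-solution-archiving-site | data/source/34848_102136079.py | f
-- ===== SOURCE A (Python) =====
-- dp = dict()
--
-- def f(n: int):
--   if dp.get(n, -1) != -1:
--     return dp[n]
--
--   if n == 2:
--     dp[n] = 0
--     return dp[n]
--
--   if n % 2 == 1:
--     dp[n] = f(n // 2 + 1) + 1
--   else:
--     dp[n] = f(n // 2)
--
--   return dp[n]
-- ===== SOURCE B (Python) =====
-- def f(n: int):
--   count = 0
--   while n != 2:
--     if n % 2 == 1:
--       n = n // 2 + 1
--       count += 1
--     else: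
--       n = n // 2
--   return count
-- ===== Notes on version B (the rewrite author's own statement) =====
-- stated objective: simpler
-- what changed: Replaces the global-dict memoized recursion with a plain iterative while-loop carrying a step counter; no memo dict, no recursion.
-- outside the precondition, e.g. on f(1): A raises RecursionError, B does not finish within the time limit
import Mathlib
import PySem

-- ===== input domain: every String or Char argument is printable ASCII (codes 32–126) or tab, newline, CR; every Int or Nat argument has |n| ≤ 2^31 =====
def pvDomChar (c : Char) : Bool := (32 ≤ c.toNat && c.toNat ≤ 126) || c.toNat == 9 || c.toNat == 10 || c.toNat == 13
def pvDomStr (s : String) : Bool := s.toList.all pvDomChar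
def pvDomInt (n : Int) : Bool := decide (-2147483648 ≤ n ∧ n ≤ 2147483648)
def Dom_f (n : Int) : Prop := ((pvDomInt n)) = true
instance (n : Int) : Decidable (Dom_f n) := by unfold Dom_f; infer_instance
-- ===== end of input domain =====

-- B replaces the global-dict memoized recursion of A with a plain iterative loop carrying a step counter (simpler).

-- termination fact shared by both ports' recursions
theorem pvHalfLt (n : Int) (h3 : 3 ≤ n) :
    (PySem.Int.floordiv n 2).toNat < n.toNat ∧ (PySem.Int.floordiv n 2 + 1).toNat < n.toNat := by
  rw [PySem.Int.floordiv_eq_ediv_of_pos (by omega)]; omega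

-- ===== PORT A =====
-- A's memo dict `dp` is global; a fresh run starts it empty, so `f` calls the helper with Dict.empty.
-- The recursion threads the dict exactly as Python does. For n ≤ 1 Python A recurses forever
-- (RecursionError) — those inputs are outside Pre_f; the port returns (0, dp) there as a totality guard.
def fAux (dp : PySem.Dict Int Int) (n : Int) : Int × PySem.Dict Int Int :=
  if dp.getD n (-1) ≠ -1 then (dp.getD n (-1), dp)
  else if n = 2 then
    let dp := dp.insert n 0
    (dp.getD n (-1), dp)
  else if h1 : n ≤ 1 then (0, dp)   -- totality guard: Python raises RecursionError here (outside Pre_f)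
  else if ho : PySem.Int.mod n 2 = 1 then
    let r := fAux dp (PySem.Int.floordiv n 2 + 1)
    let dp := r.2.insert n (r.1 + 1)
    (dp.getD n (-1), dp)
  else
    let r := fAux dp (PySem.Int.floordiv n 2)
    let dp := r.2.insert n r.1
    (dp.getD n (-1), dp)
termination_by n.toNat
decreasing_by
  · exact (pvHalfLt n (by omega)).2
  · exact (pvHalfLt n (by omega)).1

def f (n : Int) : Int := (fAux PySem.Dict.empty n).1

-- ===== PORT B =====
-- Iterative while-loop with an accumulator; same totality guard for n ≤ 1 (B's Python loops forever there).
def loopB (n : Int) (count : Int) : Int :=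
  if n = 2 then count
  else if h1 : n ≤ 1 then count   -- totality guard: Python B loops forever here (outside Pre_f)
  else if PySem.Int.mod n 2 = 1 then loopB (PySem.Int.floordiv n 2 + 1) (count + 1)
  else loopB (PySem.Int.floordiv n 2) count
termination_by n.toNat
decreasing_by
  · exact (pvHalfLt n (by omega)).2
  · exact (pvHalfLt n (by omega)).1

def f_alt (n : Int) : Int := loopB n 0

-- ===== PRECONDITION & SPEC =====
-- Pre_f excludes n ≤ 1, where Python A's recursion never terminates (RecursionError).
def Pre_f (n : Int) : Prop := 2 ≤ n
instance (n : Int) : Decidable (Pre_f n) := by unfold Pre_f; infer_instance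
def pvWitness_f : Int := (7)

def Spec_f (n : Int) (out : Int) : Prop := out = f_alt n
instance (n : Int) (out : Int) : Decidable (Spec_f n out) := by unfold Spec_f; infer_instance

-- ===== CLAIM (what is proved, stated in full; the proofs are below) =====
def Claim_equal_f : Prop := ∀ (n : Int), Dom_f n → Pre_f n → Spec_f n (f n)

-- ===== LEMMAS AND PROOFS =====

-- loop values at the base cases
theorem loopB_two (c : Int) : loopB 2 c = c := by rw [loopB]; simp

theorem loopB_low (n : Int) (h2 : n ≠ 2) (h1 : n ≤ 1) (c : Int) : loopB n c = c := by
  rw [loopB]; simp [h2, h1]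

-- one unfolding of the loop on the interesting inputs
theorem loopB_step (n : Int) (h2 : n ≠ 2) (h1 : ¬ n ≤ 1) (c : Int) :
    loopB n c = if PySem.Int.mod n 2 = 1 then loopB (PySem.Int.floordiv n 2 + 1) (c + 1)
                else loopB (PySem.Int.floordiv n 2) c := by
  conv_lhs => rw [loopB]
  rw [if_neg h2, dif_neg h1]

-- the accumulator shifts out of the loop
theorem loopB_acc (n : Int) : ∀ c, loopB n c = loopB n 0 + c := by
  generalize hm : n.toNat = m
  induction m using Nat.strong_induction_on generalizing n with
  | _ m ih =>
    intro c
    by_cases h2 : n = 2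
    · subst h2; rw [loopB_two, loopB_two]; ring
    · by_cases h1 : n ≤ 1
      · rw [loopB_low n h2 h1, loopB_low n h2 h1]; ring
      · rw [loopB_step n h2 h1, loopB_step n h2 h1]
        by_cases ho : PySem.Int.mod n 2 = 1
        · rw [if_pos ho, if_pos ho,
              ih _ (hm ▸ (pvHalfLt n (by omega)).2) _ rfl (c + 1),
              ih _ (hm ▸ (pvHalfLt n (by omega)).2) _ rfl (0 + 1)]
          ring
        · rw [if_neg ho, if_neg ho,
              ih _ (hm ▸ (pvHalfLt n (by omega)).1) _ rfl c]

-- invariant: every memo entry equals the loop's value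
def MemoInv (dp : PySem.Dict Int Int) : Prop := ∀ k v, dp.get? k = some v → v = f_alt k

-- reading a memo hit is correct under the invariant
theorem memo_hit (dp : PySem.Dict Int Int) (n : Int) (hInv : MemoInv dp)
    (hm : dp.getD n (-1) ≠ -1) : dp.getD n (-1) = f_alt n := by
  have h2 := PySem.Dict.getD_eq_get?_getD (d := dp) (k := n) (d0 := (-1:Int))
  cases hg : dp.get? n with
  | none => rw [h2, hg] at hm; simp at hm
  | some v => rw [h2, hg]; exact hInv n v hg

theorem fAux_correct (n : Int) : ∀ dp, MemoInv dp →
    (fAux dp n).1 = f_alt n ∧ MemoInv (fAux dp n).2 := by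
  generalize hmm : n.toNat = m
  induction m using Nat.strong_induction_on generalizing n with
  | _ m ih =>
    intro dp hInv
    rw [fAux]
    by_cases hm : dp.getD n (-1) ≠ -1
    · rw [if_pos hm]
      exact ⟨memo_hit dp n hInv hm, hInv⟩
    · rw [if_neg hm]
      by_cases h2 : n = 2
      · subst h2
        rw [if_pos rfl]
        have hf2 : f_alt 2 = 0 := loopB_two 0
        refine ⟨by simp [PySem.Dict.getD_insert_self, hf2], ?_⟩
        intro k v hk
        simp only at hk
        by_cases hk2 : k = (2:Int)
        · subst hk2
          rw [PySem.Dict.get?_insert_self] at hk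
          injection hk with hk'
          rw [← hk', hf2]
        · rw [PySem.Dict.get?_insert_of_ne _ _ hk2] at hk
          exact hInv k v hk
      · rw [if_neg h2]
        by_cases h1 : n ≤ 1
        · rw [dif_pos h1]
          exact ⟨(loopB_low n h2 h1 0).symm, hInv⟩
        · rw [dif_neg h1]
          by_cases ho : PySem.Int.mod n 2 = 1
          · rw [dif_pos ho]
            obtain ⟨hval, hInv'⟩ :=
              ih _ (hmm ▸ (pvHalfLt n (by omega)).2) _ rfl dp hInv
            have hstep : f_alt n = (fAux dp (PySem.Int.floordiv n 2 + 1)).1 + 1 := by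
              rw [hval]
              unfold f_alt
              rw [loopB_step n h2 h1, if_pos ho, loopB_acc]
              ring
            refine ⟨by simp only [PySem.Dict.getD_insert_self]; omega, ?_⟩
            intro k v hk
            simp only at hk
            by_cases hkn : k = n
            · subst hkn
              rw [PySem.Dict.get?_insert_self] at hk
              injection hk with hk'
              omega
            · rw [PySem.Dict.get?_insert_of_ne _ _ hkn] at hk
              exact hInv' k v hk
          · rw [dif_neg ho]
            obtain ⟨hval, hInv'⟩ :=
              ih _ (hmm ▸ (pvHalfLt n (by omega)).1) _ rfl dp hInv
            have hstep : f_alt n = (fAux dp (PySem.Int.floordiv n 2)).1 := by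
              rw [hval]
              unfold f_alt
              rw [loopB_step n h2 h1, if_neg ho]
            refine ⟨by simp only [PySem.Dict.getD_insert_self]; omega, ?_⟩
            intro k v hk
            simp only at hk
            by_cases hkn : k = n
            · subst hkn
              rw [PySem.Dict.get?_insert_self] at hk
              injection hk with hk'
              omega
            · rw [PySem.Dict.get?_insert_of_ne _ _ hkn] at hk
              exact hInv' k v hk

-- ===== VERDICT (by name: the statement is the Claim_ definition above) =====
theorem f_spec : Claim_equal_f := by
  intro n _ _
  unfold Spec_f f
  exact (fAux_correct n PySem.Dict.empty
    (by intro k v hk; simp [PySem.Dict.get?_empty] at hk)).1
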